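-- pv_equiv track=rewrite | github.com/SamWheating/AdventOfCode2019 | 8/day8.py | form_pixels
-- ===== SOURCE A (Python) =====
-- WIDTH = 25
--
-- HEIGHT = 6
--
-- def form_pixels(inputs):
--     pixels = [[[] for i in range(HEIGHT)] for i in range(WIDTH)]
--     row = 0
--     col = 0
--     for bit in inputs:
--         pixels[col][row].append(bit)
--         col += 1
--         if col == WIDTH:
--             col = 0
--             row += 1
--         if row == HEIGHT:
--             row = 0
--     return pixels
-- ===== SOURCE B (Python) =====
-- WIDTH = 25
--
-- HEIGHT = 6
--
-- def form_pixels(inputs):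
--     # For the bit at flat index i, its column is i % WIDTH and its row is
--     # (i // WIDTH) % HEIGHT; build each pixel's list by selecting those bits.
--     return [[[bit for i, bit in enumerate(inputs)
--               if i % WIDTH == col and (i // WIDTH) % HEIGHT == row]
--              for row in range(HEIGHT)]
--             for col in range(WIDTH)]
-- ===== Notes on version B (the rewrite author's own statement) =====
-- stated objective: alternative
-- what changed: Replaces A's single pass with mutable row/col counters by a per-pixel selection: each pixels[col][row] is built directly as the bits whose flat index i satisfies i % WIDTH == col and (i // WIDTH) % HEIGHT == row.
import Mathlib
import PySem

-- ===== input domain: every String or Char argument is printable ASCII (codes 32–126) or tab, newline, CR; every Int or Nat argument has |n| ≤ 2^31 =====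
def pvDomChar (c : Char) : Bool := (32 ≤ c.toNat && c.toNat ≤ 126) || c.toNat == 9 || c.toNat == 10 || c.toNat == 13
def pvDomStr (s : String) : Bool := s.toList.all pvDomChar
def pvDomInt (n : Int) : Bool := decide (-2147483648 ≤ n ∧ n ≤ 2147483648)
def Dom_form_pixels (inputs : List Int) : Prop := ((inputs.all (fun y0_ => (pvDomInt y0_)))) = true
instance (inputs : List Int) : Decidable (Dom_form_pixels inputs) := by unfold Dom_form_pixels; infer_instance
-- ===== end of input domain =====

-- B replaces A's single pass with running row/col counters by a per-pixel selection:
-- pixels[col][row] = the bits whose flat index i has i % 25 = col and (i // 25) % 6 = row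
-- (objective: alternative decomposition, same exact result).

-- ===== PORT A =====
def pixInit : List (List (List Int)) :=
  (List.range 25).map (fun _ => (List.range 6).map (fun _ => ([] : List Int)))

def pixStep (st : List (List (List Int)) × Nat × Nat) (bit : Int) :
    List (List (List Int)) × Nat × Nat :=
  -- st = (pixels, row, col); pixels[col][row].append(bit); col += 1; wrap col then row
  let pixels := st.1.modify st.2.2 (fun colL => colL.modify st.2.1 (fun cell => cell ++ [bit]))
  let col := st.2.2 + 1
  let rc := if col = 25 then ((0 : Nat), st.2.1 + 1) else (col, st.2.1)
  let row := if rc.2 = 6 then 0 else rc.2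
  (pixels, row, rc.1)

def form_pixels (inputs : List Int) : List (List (List Int)) :=
  (inputs.foldl pixStep (pixInit, 0, 0)).1

-- ===== PORT B =====
def form_pixels_alt (inputs : List Int) : List (List (List Int)) :=
  (PySem.List.pyRange 0 25 1).map (fun col =>
    (PySem.List.pyRange 0 6 1).map (fun row =>
      ((PySem.List.enumerate inputs).filter
        (fun p => PySem.Int.mod p.1 25 == col &&
                  PySem.Int.mod (PySem.Int.floordiv p.1 25) 6 == row)).map (fun p => p.2)))

-- ===== PRECONDITION & SPEC =====
def Spec_form_pixels (inputs : List Int) (out : List (List (List Int))) : Prop := out = form_pixels_alt inputs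
instance (inputs : List Int) (out : List (List (List Int))) : Decidable (Spec_form_pixels inputs out) := by unfold Spec_form_pixels; infer_instance

-- ===== CLAIM (what is proved, stated in full; the proofs are below) =====
def Claim_equal_form_pixels : Prop := ∀ (inputs : List Int), Dom_form_pixels inputs → Spec_form_pixels inputs (form_pixels inputs)

-- ===== LEMMAS AND PROOFS =====

-- the cell selector of B, over Nat coordinates
def altFun (xs : List Int) (c r : Nat) : List Int :=
  ((PySem.List.enumerate xs).filter
    (fun p => PySem.Int.mod p.1 25 == (c : Int) &&
              PySem.Int.mod (PySem.Int.floordiv p.1 25) 6 == (r : Int))).map (fun p => p.2)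

lemma alt_eq (xs : List Int) :
    form_pixels_alt xs =
      (List.range 25).map (fun c => (List.range 6).map (fun r => altFun xs c r)) := by
  have h25 : PySem.List.pyRange 0 25 1 = (List.range 25).map (fun k : Nat => (k : Int)) := by decide
  have h6 : PySem.List.pyRange 0 6 1 = (List.range 6).map (fun k : Nat => (k : Int)) := by decide
  simp [form_pixels_alt, altFun, h25, h6, List.map_map, Function.comp]

lemma mod25 (n : Nat) : PySem.Int.mod (n : Int) 25 = ((n % 25 : Nat) : Int) := by
  rw [PySem.Int.mod_eq_emod_of_pos (by norm_num)]; omega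

lemma div25 (n : Nat) : PySem.Int.floordiv (n : Int) 25 = ((n / 25 : Nat) : Int) := by
  rw [PySem.Int.floordiv_eq_ediv_of_pos (by norm_num)]; omega

lemma mod6 (n : Nat) : PySem.Int.mod (n : Int) 6 = ((n % 6 : Nat) : Int) := by
  rw [PySem.Int.mod_eq_emod_of_pos (by norm_num)]; omega

lemma altFun_append (xs : List Int) (b : Int) (c r : Nat) :
    altFun (xs ++ [b]) c r =
      altFun xs c r ++ (if xs.length % 25 = c ∧ (xs.length / 25) % 6 = r then [b] else []) := by
  unfold altFun
  rw [PySem.List.enumerate_append, List.filter_append, List.map_append]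
  congr 1
  have he : PySem.List.enumerate [b] (0 + (xs.length : Int)) = [(((xs.length : Nat) : Int), b)] := by
    simp [PySem.List.enumerate_cons, PySem.List.enumerate_nil]
  rw [he]
  simp only [List.filter, mod25, div25, mod6]
  by_cases h : xs.length % 25 = c ∧ (xs.length / 25) % 6 = r
  · simp [h.1, h.2]
  · rw [if_neg h]
    split
    next heq =>
      exfalso
      rw [Bool.and_eq_true, beq_iff_eq, beq_iff_eq] at heq
      omega
    next => rfl

lemma alt_nil : form_pixels_alt [] = pixInit := by decide

lemma alt_append (xs : List Int) (b : Int) :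
    form_pixels_alt (xs ++ [b]) =
      (form_pixels_alt xs).modify (xs.length % 25)
        (fun colL => colL.modify ((xs.length / 25) % 6) (fun cell => cell ++ [b])) := by
  rw [alt_eq, alt_eq]
  apply List.ext_getElem
  · simp
  · intro c hc _
    simp only [List.length_map, List.length_range] at hc
    rw [List.getElem_modify]
    simp only [List.getElem_map, List.getElem_range]
    by_cases hcol : xs.length % 25 = c
    · rw [if_pos hcol]
      apply List.ext_getElem
      · simp
      · intro r hr _
        simp only [List.length_map, List.length_range] at hr
        rw [List.getElem_modify]
        simp only [List.getElem_map, List.getElem_range]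
        by_cases hrow : (xs.length / 25) % 6 = r
        · rw [if_pos hrow, altFun_append, if_pos ⟨hcol, hrow⟩]
        · rw [if_neg hrow, altFun_append, if_neg (by tauto), List.append_nil]
    · rw [if_neg hcol]
      apply List.ext_getElem
      · simp
      · intro r hr _
        simp only [List.length_map, List.length_range] at hr
        simp only [List.getElem_map, List.getElem_range]
        rw [altFun_append, if_neg (by tauto), List.append_nil]

lemma loop_inv (xs : List Int) :
    xs.foldl pixStep (pixInit, 0, 0) =
      (form_pixels_alt xs, (xs.length / 25) % 6, xs.length % 25) := by
  induction xs using List.reverseRecOn with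
  | nil => simp [alt_nil]
  | append_singleton xs b ih =>
    rw [List.foldl_append, ih]
    simp only [List.foldl_cons, List.foldl_nil, List.length_append, List.length_singleton]
    unfold pixStep
    refine Prod.ext ?_ (Prod.ext ?_ ?_)
    · simp only
      rw [alt_append]
    · simp only
      split_ifs <;> omega
    · simp only
      split_ifs <;> omega

-- ===== VERDICT (by name: the statement is the Claim_ definition above) =====
theorem form_pixels_spec : Claim_equal_form_pixels := by
  intro inputs _
  unfold Spec_form_pixels form_pixels
  rw [loop_inv]
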